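-- pv_equiv track=rewrite | github.com/jackliuto/model_diff_XADD | utils/xadd_utils.py | gen_action_space
-- ===== SOURCE A (Python) =====
-- import itertools
--
-- def gen_action_space(action_name_list):
--     bool_combos = [list(i) for i in itertools.product([0, 1], repeat=len(action_name_list))]
--     action_list = []
--     for b in bool_combos:
--         a = {}
--         for i, v in enumerate(b):
--             a[action_name_list[i]] = True if v==1 else False
--         action_list.append(a)
--     return action_list
-- ===== SOURCE B (Python) =====
-- def gen_action_space(action_name_list):
--     action_list = [{}]
--     for name in action_name_list:
--         action_list = [{**a, name: v} for a in action_list for v in (False, True)]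
--     return action_list
-- ===== Notes on version B (the rewrite author's own statement) =====
-- stated objective: simpler
-- what changed: Instead of enumerating all 2^n bit tuples with itertools.product and decoding each into a fresh dict, B builds the dicts incrementally: it starts from [{}] and, for each action name in turn, replaces every partial dict by its two one-key extensions (False then True), doubling the list per name.
import Mathlib
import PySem

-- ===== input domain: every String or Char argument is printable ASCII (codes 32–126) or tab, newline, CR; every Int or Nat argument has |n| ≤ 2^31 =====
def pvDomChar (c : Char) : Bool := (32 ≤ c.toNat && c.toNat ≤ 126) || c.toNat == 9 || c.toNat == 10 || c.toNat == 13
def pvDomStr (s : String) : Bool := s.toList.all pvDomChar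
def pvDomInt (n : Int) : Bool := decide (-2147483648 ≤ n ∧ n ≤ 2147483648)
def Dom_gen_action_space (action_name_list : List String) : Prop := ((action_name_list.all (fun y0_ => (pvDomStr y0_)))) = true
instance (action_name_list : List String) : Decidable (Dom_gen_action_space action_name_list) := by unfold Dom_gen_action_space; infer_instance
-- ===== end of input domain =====

-- B builds the dicts incrementally: starting from [{}], each action name doubles the list
-- by extending every partial dict with name↦False and name↦True — no product, no bit tuples.

-- ===== PORT A =====
-- itertools.product([0, 1], repeat=n): the leftmost position varies slowest
def prod01 : Nat → List (List Int)
  | 0 => [[]]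
  | n + 1 => ([0, 1] : List Int).flatMap (fun x => (prod01 n).map (fun rest => x :: rest))

def gen_action_space (action_name_list : List String) : List (List (String × Bool)) :=
  let bool_combos := prod01 action_name_list.length
  bool_combos.foldl (fun action_list b =>
    action_list ++ [((PySem.List.enumerate b 0).foldl
        -- a[action_name_list[i]] = True if v==1 else False; i < len(b) = len(action_name_list),
        -- so the index is always in range and pyGetD's default is never used
        (fun a iv => a.insert (PySem.List.pyGetD action_name_list iv.1 "") (iv.2 == 1))
        PySem.Dict.empty).items]) []

-- ===== PORT B =====
-- action_list = [{**a, name: v} for a in action_list for v in (False, True)]: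
-- a flatMap producing the two one-key extensions of each partial dict, folded over the names;
-- the dict→assoc-list conversion of the output type is the final .items map
def gen_action_space_alt (action_name_list : List String) : List (List (String × Bool)) :=
  (action_name_list.foldl
    (fun action_list name =>
      action_list.flatMap (fun a => [a.insert name false, a.insert name true]))
    [PySem.Dict.empty]).map (fun a => a.items)

-- ===== PRECONDITION & SPEC =====
def Spec_gen_action_space (action_name_list : List String) (out : List (List (String × Bool))) : Prop := out = gen_action_space_alt action_name_list
instance (action_name_list : List String) (out : List (List (String × Bool))) : Decidable (Spec_gen_action_space action_name_list out) := by unfold Spec_gen_action_space; infer_instance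

-- ===== CLAIM (what is proved, stated in full; the proofs are below) =====
def Claim_equal_gen_action_space : Prop := ∀ (action_name_list : List String), Dom_gen_action_space action_name_list → Spec_gen_action_space action_name_list (gen_action_space action_name_list)

-- ===== LEMMAS AND PROOFS =====

-- common shape: walk names and 0/1 values in lockstep, inserting
def buildDict (ns : List String) (bs : List Int) (d : PySem.Dict String Bool) : PySem.Dict String Bool :=
  match ns, bs with
  | nm :: ns', v :: bs' => buildDict ns' bs' (d.insert nm (v == 1))
  | _, _ => d

lemma innerA_eq_buildDict (b : List Int) : ∀ (names : List String) (s : Nat)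
    (d : PySem.Dict String Bool), s + b.length ≤ names.length →
    (PySem.List.enumerate b (s : Int)).foldl
      (fun a iv => a.insert (PySem.List.pyGetD names iv.1 "") (iv.2 == 1)) d
    = buildDict (names.drop s) b d := by
  induction b with
  | nil => intro names s d _; simp [PySem.List.enumerate_nil, buildDict]
  | cons v b' ih =>
    intro names s d h
    have hs : s < names.length := by simp at h; omega
    rw [PySem.List.enumerate_cons]
    simp only [List.foldl_cons]
    have h1 : PySem.List.pyGetD names (s : Int) "" = names[s] := by
      rw [PySem.List.pyGetD_natCast]; exact List.getD_eq_getElem names "" hs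
    have h2 : ((s : Int) + 1) = ((s + 1 : Nat) : Int) := by push_cast; ring
    rw [h1, h2, ih names (s + 1) _ (by simp at h ⊢; omega)]
    rw [List.drop_eq_getElem_cons hs]
    rfl

-- the doubling fold, over any starting list, yields each start dict extended by every combo
lemma foldlB_eq_prod01 : ∀ (names : List String) (L : List (PySem.Dict String Bool)),
    names.foldl
      (fun action_list name =>
        action_list.flatMap (fun a => [a.insert name false, a.insert name true])) L
    = L.flatMap (fun d => (prod01 names.length).map (fun b => buildDict names b d)) := by
  intro names
  induction names with
  | nil => intro L; simp [prod01, buildDict]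
  | cons n ns ih =>
    intro L
    simp only [List.foldl_cons]
    rw [ih]
    rw [List.flatMap_assoc]
    apply List.flatMap_congr
    intro d _
    show ([d.insert n false, d.insert n true]).flatMap
        (fun d' => (prod01 ns.length).map (fun b => buildDict ns b d'))
      = (prod01 (ns.length + 1)).map (fun b => buildDict (n :: ns) b d)
    simp only [prod01, List.flatMap_cons, List.flatMap_nil, List.append_nil, List.map_append,
      List.map_map]
    rfl

lemma prod01_length : ∀ (n : Nat), ∀ b ∈ prod01 n, b.length = n := by
  intro n
  induction n with
  | zero => intro b hb; simp [prod01] at hb; simp [hb]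
  | succ n ih =>
    intro b hb
    simp only [prod01, List.mem_flatMap, List.mem_map] at hb
    obtain ⟨x, _, rest, hr, rfl⟩ := hb
    simp [ih rest hr]

-- ===== VERDICT (by name: the statement is the Claim_ definition above) =====
theorem gen_action_space_spec : Claim_equal_gen_action_space := by
  intro names _
  unfold Spec_gen_action_space gen_action_space gen_action_space_alt
  simp only []
  rw [PySem.List.foldl_append_singleton_eq_map, foldlB_eq_prod01]
  simp only [List.flatMap_cons, List.flatMap_nil, List.append_nil, List.map_map]
  apply List.map_congr_left
  intro b hb
  simp only [Function.comp_apply]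
  rw [show (0 : Int) = ((0 : Nat) : Int) from rfl]
  rw [innerA_eq_buildDict b names 0 _ (by
    have := prod01_length names.length b hb
    omega)]
  simp [List.drop_zero]
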